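-- pv_equiv track=rewrite | github.com/dev-jko/TIL | learn/algorithm/programmers/naver/1.py | solution
-- ===== SOURCE A (Python) =====
-- top_domain = ("com", "net", "org")
--
-- def solution(emails):
--     answer = 0
--
--     for email in emails:
--         t = email.split("@")
--         if len(t) != 2 or t[0] == "" or t[1] == "":
--             continue
--         t = t[1].split(".")
--         if len(t) != 2 or t[0] == "" or t[1] == "":
--             continue
--         if t[1] in top_domain:
--             answer += 1
--     return answer
-- ===== SOURCE B (Python) =====
-- def solution(emails):
--     answer = 0
--     for e in emails:
--         if e.endswith(".com") or e.endswith(".net") or e.endswith(".org"):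
--             stem = e[:-4]
--             i = stem.find("@")
--             if i > 0 and i + 1 < len(stem) and "@" not in stem[i + 1:] and "." not in stem[i + 1:]:
--                 answer += 1
--     return answer
-- ===== Notes on version B (the rewrite author's own statement) =====
-- stated objective: alternative
-- what changed: Instead of splitting each email on '@' and then on '.' and guarding each part, B first checks the '.com'/'.net'/'.org' suffix, strips it, and validates the remaining stem with one find('@') plus two substring-absence tests.
import Mathlib
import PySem

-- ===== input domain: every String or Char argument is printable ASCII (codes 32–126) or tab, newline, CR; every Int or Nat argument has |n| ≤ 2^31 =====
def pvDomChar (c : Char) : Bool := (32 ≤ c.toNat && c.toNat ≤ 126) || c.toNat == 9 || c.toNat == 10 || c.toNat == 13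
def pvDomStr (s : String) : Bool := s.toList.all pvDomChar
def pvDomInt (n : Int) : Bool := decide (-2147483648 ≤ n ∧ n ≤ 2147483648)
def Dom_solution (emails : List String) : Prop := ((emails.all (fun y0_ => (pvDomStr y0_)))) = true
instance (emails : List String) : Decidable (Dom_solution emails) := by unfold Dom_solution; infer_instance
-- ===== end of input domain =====

-- B replaces the split-on-'@'-then-split-on-'.' guard chain by a suffix check for ".com"/".net"/".org"
-- followed by one find('@') on the stripped stem plus two substring-absence tests (alternative decomposition, same cost).

-- ===== PORT A =====
def topDomain : List (List Char) := [String.toList "com", String.toList "net", String.toList "org"]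

-- loop body of A; split("@") / split(".") have a non-empty separator, so Python's split never raises:
-- it is exactly PySem.Chars.splitOn.
def bodyA (answer : Int) (email : String) : Int :=
  let t := PySem.Chars.splitOn email.toList ['@']
  if t.length ≠ 2 ∨ t.getD 0 [] = [] ∨ t.getD 1 [] = [] then answer
  else
    let t2 := PySem.Chars.splitOn (t.getD 1 []) ['.']
    if t2.length ≠ 2 ∨ t2.getD 0 [] = [] ∨ t2.getD 1 [] = [] then answer
    else if t2.getD 1 [] ∈ topDomain then answer + 1 else answer

def solution (emails : List String) : Int :=
  emails.foldl bodyA 0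

-- ===== PORT B =====
-- loop body of B
def bodyB (answer : Int) (e : String) : Int :=
  if PySem.Chars.endswith e.toList (String.toList ".com") ∨
     PySem.Chars.endswith e.toList (String.toList ".net") ∨
     PySem.Chars.endswith e.toList (String.toList ".org") then
    let stem := PySem.List.slice e.toList none (some (-4))
    let i := PySem.Chars.find stem ['@']
    if 0 < i ∧ i + 1 < stem.length ∧
       PySem.Chars.isIn ['@'] (PySem.List.slice stem (some (i + 1)) none) = false ∧
       PySem.Chars.isIn ['.'] (PySem.List.slice stem (some (i + 1)) none) = false then
      answer + 1
    else answer
  else answer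

def solution_alt (emails : List String) : Int :=
  emails.foldl bodyB 0

-- ===== PRECONDITION & SPEC =====
def Spec_solution (emails : List String) (out : Int) : Prop := out = solution_alt emails
instance (emails : List String) (out : Int) : Decidable (Spec_solution emails out) := by unfold Spec_solution; infer_instance

-- ===== CLAIM (what is proved, stated in full; the proofs are below) =====
def Claim_equal_solution : Prop := ∀ (emails : List String), Dom_solution emails → Spec_solution emails (solution emails)

-- ===== LEMMAS AND PROOFS =====

-- canonical shape of a valid email: loc ++ '@' ++ sub ++ '.' ++ tld
def PGood (l : List Char) : Prop :=
  ∃ loc sub tld, tld ∈ topDomain ∧ l = loc ++ '@' :: (sub ++ '.' :: tld) ∧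
    loc ≠ [] ∧ sub ≠ [] ∧ '@' ∉ loc ∧ '@' ∉ sub ∧ '.' ∉ sub

-- simple reference version of split-on-one-character
def sp (c : Char) : List Char → List (List Char)
  | [] => [[]]
  | a :: t =>
    if a = c then [] :: sp c t
    else match sp c t with
      | [] => [[a]]
      | h :: r => (a :: h) :: r

theorem sp_ne_nil (c : Char) (l : List Char) : sp c l ≠ [] := by
  induction l with
  | nil => simp [sp]
  | cons a t ih =>
    simp only [sp]
    split
    · simp
    · split <;> simp_all

def consHd (p : List Char) : List (List Char) → List (List Char)
  | [] => [p]
  | h :: t => (p ++ h) :: t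

theorem splitOn_go_eq (c : Char) (fuel : Nat) (l cur : List Char) (acc : List (List Char))
    (h : l.length ≤ fuel) :
    PySem.Chars.splitOn.go [c] fuel l cur acc = acc.reverse ++ consHd cur.reverse (sp c l) := by
  induction fuel generalizing l cur acc with
  | zero =>
    have hl : l = [] := by cases l <;> simp_all
    subst hl
    rw [PySem.Chars.splitOn.go]
    simp [sp, consHd]
  | succ f ih =>
    cases l with
    | nil =>
      rw [PySem.Chars.splitOn.go]
      all_goals simp [sp, consHd]
    | cons a rest =>
      rw [PySem.Chars.splitOn.go]
      by_cases hc : c = a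
      · subst hc
        have hp : [c].isPrefixOf (c :: rest) = true := by simp [List.isPrefixOf]
        simp only [hp, if_true]
        have hd : List.drop [c].length (c :: rest) = rest := by simp
        rw [hd, ih rest [] (cur.reverse :: acc) (by simp at h ⊢; omega)]
        simp only [sp, if_pos rfl, List.reverse_cons, List.append_assoc]
        cases hsp : sp c rest with
        | nil => exact absurd hsp (sp_ne_nil c rest)
        | cons s0 sr => simp [consHd]
      · have hp : [c].isPrefixOf (a :: rest) = false := by
          simp [List.isPrefixOf]; exact fun hh => absurd hh hc
        simp only [hp, Bool.false_eq_true, if_false]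
        rw [ih rest (a :: cur) acc (by simp at h ⊢; omega)]
        simp only [sp]
        rw [if_neg (fun hh => hc hh.symm)]
        cases hsp : sp c rest with
        | nil => exact absurd hsp (sp_ne_nil c rest)
        | cons s0 sr => simp [consHd]

theorem splitOn_single (c : Char) (l : List Char) :
    PySem.Chars.splitOn l [c] = sp c l := by
  rw [PySem.Chars.splitOn, splitOn_go_eq c (l.length + 1) l [] [] (by omega)]
  cases hsp : sp c l with
  | nil => exact absurd hsp (sp_ne_nil c l)
  | cons s0 sr => simp [consHd]

theorem sp_singleton_fwd (c : Char) (l : List Char) : ∀ b, sp c l = [b] →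
    l = b ∧ c ∉ b := by
  induction l with
  | nil =>
    intro b h
    simp only [sp, List.cons.injEq, and_true] at h
    exact ⟨h, by rw [← h]; simp⟩
  | cons a t ih =>
    intro b h
    simp only [sp] at h
    split at h
    · rename_i hac
      have hnil : sp c t = [] := by
        cases hh : sp c t <;> simp_all
      exact absurd hnil (sp_ne_nil c t)
    · rename_i hac
      cases hsp : sp c t with
      | nil => exact absurd hsp (sp_ne_nil c t)
      | cons s0 sr =>
        rw [hsp] at h
        injection h with h1 h2
        subst h2
        obtain ⟨rfl, hnm⟩ := ih s0 hsp
        subst h1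
        refine ⟨rfl, ?_⟩
        simp only [List.mem_cons]
        rintro (rfl | hm)
        · exact hac rfl
        · exact hnm hm

theorem sp_pair_fwd (c : Char) (l : List Char) : ∀ a b, sp c l = [a, b] →
    l = a ++ c :: b ∧ c ∉ a ∧ c ∉ b := by
  induction l with
  | nil => intro a b h; simp [sp] at h
  | cons x t ih =>
    intro a b h
    simp only [sp] at h
    split at h
    · rename_i hxc
      subst hxc
      injection h with h1 h2
      obtain ⟨rfl, hnb⟩ := sp_singleton_fwd x t b h2
      subst h1
      simpa using hnb
    · rename_i hxc
      cases hsp : sp c t with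
      | nil => exact absurd hsp (sp_ne_nil c t)
      | cons s0 sr =>
        rw [hsp] at h
        injection h with h1 h2
        subst h1
        obtain ⟨rfl, hca, hcb⟩ := ih s0 b (by rw [hsp, h2])
        refine ⟨by simp, ?_, hcb⟩
        simp only [List.mem_cons]
        rintro (rfl | hm)
        · exact hxc rfl
        · exact hca hm

theorem sp_of_not_mem (c : Char) (b : List Char) (h : c ∉ b) : sp c b = [b] := by
  induction b with
  | nil => simp [sp]
  | cons a t ih =>
    simp only [List.mem_cons, not_or] at h
    have hac : a ≠ c := fun hh => h.1 hh.symm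
    simp only [sp, if_neg hac, ih h.2]

theorem sp_append (c : Char) (a r : List Char) (h : c ∉ a) :
    sp c (a ++ c :: r) = a :: sp c r := by
  induction a with
  | nil => simp [sp]
  | cons x t ih =>
    simp only [List.mem_cons, not_or] at h
    have hxc : x ≠ c := fun hh => h.1 hh.symm
    simp only [List.cons_append, sp, if_neg hxc, ih h.2]

theorem find_go_single (c : Char) (s : List Char) (k : Nat) :
    PySem.Chars.find.go [c] s k = if c ∈ s then ((k : Int) + s.idxOf c) else -1 := by
  induction s generalizing k with
  | nil => simp [PySem.Chars.find.go]
  | cons a t ih =>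
    rw [PySem.Chars.find.go]
    by_cases h : c = a
    · subst h
      simp [List.isPrefixOf, List.idxOf_cons_self]
    · have hp : [c].isPrefixOf (a :: t) = false := by
        simp [List.isPrefixOf]; exact fun hh => absurd hh h
      simp only [hp, Bool.false_eq_true, if_false, ih]
      by_cases hm : c ∈ t
      · rw [List.idxOf_cons_ne t (fun hh => h hh.symm)]
        simp [hm, h]
        ring
      · simp [hm, h]

theorem find_single (c : Char) (s : List Char) :
    PySem.Chars.find s [c] = if c ∈ s then (s.idxOf c : Int) else -1 := by
  rw [PySem.Chars.find, find_go_single]; simp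

theorem not_mem_take_idxOf (c : Char) (s : List Char) : c ∉ s.take (s.idxOf c) := by
  induction s with
  | nil => simp
  | cons a t ih =>
    by_cases h : c = a
    · subst h; simp [List.idxOf_cons_self]
    · rw [List.idxOf_cons_ne t (fun hh => h hh.symm)]
      simp only [List.take_succ_cons, List.mem_cons]
      rintro (rfl | hm)
      · exact h rfl
      · exact ih hm

theorem singleton_infix_iff (a : Char) (l : List Char) : [a] <:+: l ↔ a ∈ l := by
  constructor
  · intro h; exact h.subset (by simp)
  · intro h
    obtain ⟨s, t, rfl⟩ := List.append_of_mem h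
    exact ⟨s, t, by simp⟩

theorem not_at_mem_top (tld : List Char) (h : tld ∈ topDomain) : '@' ∉ tld ∧ '.' ∉ tld := by
  simp only [topDomain, List.mem_cons, List.not_mem_nil, or_false] at h
  rcases h with rfl | rfl | rfl <;> decide

-- the per-email booleans
def chkA (l : List Char) : Bool :=
  if (PySem.Chars.splitOn l ['@']).length ≠ 2 ∨ (PySem.Chars.splitOn l ['@']).getD 0 [] = [] ∨ (PySem.Chars.splitOn l ['@']).getD 1 [] = [] then false
  else if (PySem.Chars.splitOn ((PySem.Chars.splitOn l ['@']).getD 1 []) ['.']).length ≠ 2 ∨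
       (PySem.Chars.splitOn ((PySem.Chars.splitOn l ['@']).getD 1 []) ['.']).getD 0 [] = [] ∨
       (PySem.Chars.splitOn ((PySem.Chars.splitOn l ['@']).getD 1 []) ['.']).getD 1 [] = [] then false
  else if (PySem.Chars.splitOn ((PySem.Chars.splitOn l ['@']).getD 1 []) ['.']).getD 1 [] ∈ topDomain then true
  else false

def chkB (l : List Char) : Bool :=
  if PySem.Chars.endswith l (String.toList ".com") ∨
     PySem.Chars.endswith l (String.toList ".net") ∨
     PySem.Chars.endswith l (String.toList ".org") then
    if 0 < PySem.Chars.find (PySem.List.slice l none (some (-4))) ['@'] ∧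
       PySem.Chars.find (PySem.List.slice l none (some (-4))) ['@'] + 1 < ((PySem.List.slice l none (some (-4))).length : Int) ∧
       PySem.Chars.isIn ['@'] (PySem.List.slice (PySem.List.slice l none (some (-4))) (some (PySem.Chars.find (PySem.List.slice l none (some (-4))) ['@'] + 1)) none) = false ∧
       PySem.Chars.isIn ['.'] (PySem.List.slice (PySem.List.slice l none (some (-4))) (some (PySem.Chars.find (PySem.List.slice l none (some (-4))) ['@'] + 1)) none) = false then true
    else false
  else false

theorem bodyA_eq (a : Int) (e : String) : bodyA a e = if chkA e.toList then a + 1 else a := by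
  simp only [bodyA, chkA]
  split_ifs <;> simp_all

theorem bodyB_eq (a : Int) (e : String) : bodyB a e = if chkB e.toList then a + 1 else a := by
  simp only [bodyB, chkB]
  split_ifs <;> simp_all

theorem if3_eq_true_iff (C1 C2 C3 : Prop) [Decidable C1] [Decidable C2] [Decidable C3] :
    ((if C1 then false else if C2 then false else if C3 then true else false) = true) ↔ (¬C1 ∧ ¬C2 ∧ C3) := by
  split_ifs with h1 h2 h3 <;> simp_all

theorem if2_eq_true_iff (C1 C2 : Prop) [Decidable C1] [Decidable C2] :
    ((if C1 then (if C2 then true else false) else false) = true) ↔ (C1 ∧ C2) := by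
  split_ifs with h1 h2 <;> simp_all

theorem chkA_prop (l : List Char) : chkA l = true ↔
    (¬ ((PySem.Chars.splitOn l ['@']).length ≠ 2 ∨ (PySem.Chars.splitOn l ['@']).getD 0 [] = [] ∨ (PySem.Chars.splitOn l ['@']).getD 1 [] = []) ∧
     ¬ ((PySem.Chars.splitOn ((PySem.Chars.splitOn l ['@']).getD 1 []) ['.']).length ≠ 2 ∨
        (PySem.Chars.splitOn ((PySem.Chars.splitOn l ['@']).getD 1 []) ['.']).getD 0 [] = [] ∨
        (PySem.Chars.splitOn ((PySem.Chars.splitOn l ['@']).getD 1 []) ['.']).getD 1 [] = []) ∧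
     (PySem.Chars.splitOn ((PySem.Chars.splitOn l ['@']).getD 1 []) ['.']).getD 1 [] ∈ topDomain) := by
  unfold chkA
  exact if3_eq_true_iff _ _ _

theorem chkB_prop (l : List Char) : chkB l = true ↔
    ((PySem.Chars.endswith l (String.toList ".com") ∨
      PySem.Chars.endswith l (String.toList ".net") ∨
      PySem.Chars.endswith l (String.toList ".org")) ∧
     (0 < PySem.Chars.find (PySem.List.slice l none (some (-4))) ['@'] ∧
      PySem.Chars.find (PySem.List.slice l none (some (-4))) ['@'] + 1 < ((PySem.List.slice l none (some (-4))).length : Int) ∧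
      PySem.Chars.isIn ['@'] (PySem.List.slice (PySem.List.slice l none (some (-4))) (some (PySem.Chars.find (PySem.List.slice l none (some (-4))) ['@'] + 1)) none) = false ∧
      PySem.Chars.isIn ['.'] (PySem.List.slice (PySem.List.slice l none (some (-4))) (some (PySem.Chars.find (PySem.List.slice l none (some (-4))) ['@'] + 1)) none) = false)) := by
  unfold chkB
  exact if2_eq_true_iff _ _

theorem chkA_iff (l : List Char) : chkA l = true ↔ PGood l := by
  rw [chkA_prop]
  simp only [not_or, not_not, PGood]
  constructor
  · rintro ⟨⟨hlen2, hne0, hne1⟩, ⟨hlen2', hne0', hne1'⟩, hmem⟩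
    obtain ⟨a, b, hab⟩ := List.length_eq_two.mp hlen2
    rw [hab] at hne0 hne1 hlen2' hne0' hne1' hmem
    simp only [List.getD, List.getElem?_cons_zero, List.getElem?_cons_succ, Option.getD_some] at hne0 hne1 hlen2' hne0' hne1' hmem
    obtain ⟨u, v, huv⟩ := List.length_eq_two.mp hlen2'
    rw [huv] at hne0' hne1' hmem
    simp only [List.getD, List.getElem?_cons_zero, List.getElem?_cons_succ, Option.getD_some] at hne0' hne1' hmem
    obtain ⟨rfl, hna, hnb⟩ := sp_pair_fwd '@' l a b (by rw [← splitOn_single]; exact hab)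
    obtain ⟨rfl, hnu, hnv⟩ := sp_pair_fwd '.' b u v (by rw [← splitOn_single]; exact huv)
    exact ⟨a, u, v, hmem, rfl, hne0, hne0', hna,
      fun hm => hnb (by simp [hm]), hnu⟩
  · rintro ⟨loc, sub, tld, hmem, rfl, hloc, hsub, hnloc, hnsub, hndsub⟩
    obtain ⟨hat, hdt⟩ := not_at_mem_top tld hmem
    have hnb : '@' ∉ sub ++ '.' :: tld := by
      simp only [List.mem_append, List.mem_cons, not_or]
      exact ⟨hnsub, by decide, hat⟩
    have h1 : PySem.Chars.splitOn (loc ++ '@' :: (sub ++ '.' :: tld)) ['@'] = [loc, sub ++ '.' :: tld] := by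
      rw [splitOn_single, sp_append '@' loc _ hnloc, sp_of_not_mem '@' _ hnb]
    have h2 : PySem.Chars.splitOn (sub ++ '.' :: tld) ['.'] = [sub, tld] := by
      rw [splitOn_single, sp_append '.' sub tld hndsub, sp_of_not_mem '.' tld hdt]
    rw [h1]
    simp only [List.getD, List.getElem?_cons_zero, List.getElem?_cons_succ, Option.getD_some]
    rw [h2]
    simp only [List.getD, List.getElem?_cons_zero, List.getElem?_cons_succ, Option.getD_some]
    have htne : tld ≠ [] := by
      simp only [topDomain, List.mem_cons, List.not_mem_nil, or_false] at hmem
      rcases hmem with rfl | rfl | rfl <;> decide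
    have hbne : sub ++ '.' :: tld ≠ [] := by simp
    exact ⟨⟨by simp, hloc, hbne⟩, ⟨by simp, hsub, htne⟩, hmem⟩

theorem endswith_top (l : List Char) :
    (PySem.Chars.endswith l (String.toList ".com") ∨
     PySem.Chars.endswith l (String.toList ".net") ∨
     PySem.Chars.endswith l (String.toList ".org")) ↔
    ∃ tld m, tld ∈ topDomain ∧ l = m ++ '.' :: tld := by
  constructor
  · rintro (h | h | h) <;> rw [PySem.Chars.endswith_iff] at h <;> obtain ⟨m, rfl⟩ := h
    · exact ⟨String.toList "com", m, by simp [topDomain],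
        by rw [show (String.toList ".com") = '.' :: String.toList "com" from rfl]⟩
    · exact ⟨String.toList "net", m, by simp [topDomain],
        by rw [show (String.toList ".net") = '.' :: String.toList "net" from rfl]⟩
    · exact ⟨String.toList "org", m, by simp [topDomain],
        by rw [show (String.toList ".org") = '.' :: String.toList "org" from rfl]⟩
  · rintro ⟨tld, m, hmem, rfl⟩
    simp only [topDomain, List.mem_cons, List.not_mem_nil, or_false] at hmem
    rcases hmem with rfl | rfl | rfl
    · exact Or.inl ((PySem.Chars.endswith_iff _ _).mpr
        ⟨m, by rw [show (String.toList ".com") = '.' :: String.toList "com" from rfl]⟩)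
    · exact Or.inr (Or.inl ((PySem.Chars.endswith_iff _ _).mpr
        ⟨m, by rw [show (String.toList ".net") = '.' :: String.toList "net" from rfl]⟩))
    · exact Or.inr (Or.inr ((PySem.Chars.endswith_iff _ _).mpr
        ⟨m, by rw [show (String.toList ".org") = '.' :: String.toList "org" from rfl]⟩))

theorem stem_eq (m tld : List Char) (h : tld.length = 3) :
    PySem.List.slice (m ++ '.' :: tld) none (some (-4)) = m := by
  rw [show ((-4 : Int) = -((4:Nat) : Int)) by norm_num,
      PySem.List.slice_to_neg_natCast _ 4 (by omega)]
  have : (m ++ '.' :: tld).length - 4 = m.length := by simp [h]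
  rw [this, List.take_left' rfl]

theorem top_len (tld : List Char) (h : tld ∈ topDomain) : tld.length = 3 := by
  simp only [topDomain, List.mem_cons, List.not_mem_nil, or_false] at h
  rcases h with rfl | rfl | rfl <;> decide

theorem chkB_iff (l : List Char) : chkB l = true ↔ PGood l := by
  rw [chkB_prop]
  constructor
  · rintro ⟨hend, hpos, hlt, hat, hdot⟩
    obtain ⟨tld, m, hmem, rfl⟩ := (endswith_top l).mp hend
    rw [stem_eq m tld (top_len tld hmem)] at hpos hlt hat hdot
    rw [find_single] at hpos hlt hat hdot
    by_cases hm : '@' ∈ m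
    · rw [if_pos hm] at hpos hlt hat hdot
      set n := m.idxOf '@' with hn
      have hn0 : 0 < n := by exact_mod_cast hpos
      have hnlt : n + 1 < m.length := by exact_mod_cast hlt
      have htn : ((n : Int) + 1).toNat = n + 1 := by omega
      rw [PySem.List.slice_from _ (by omega), htn] at hat hdot
      have hnat : '@' ∉ m.drop (n + 1) := by
        rw [← singleton_infix_iff, ← PySem.Chars.isIn_eq_false_iff]
        exact hat
      have hndot : '.' ∉ m.drop (n + 1) := by
        rw [← singleton_infix_iff, ← PySem.Chars.isIn_eq_false_iff]
        exact hdot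
      have hnm' : n < m.length := by omega
      have hget : m[n] = '@' := by
        have h0 : m[m.idxOf '@'] = '@' := List.getElem_idxOf (by omega)
        simp only [hn]
        exact h0
      have hd2 : m.drop n = '@' :: m.drop (n + 1) := by
        rw [List.drop_eq_getElem_cons hnm']
        exact congrArg (fun c => c :: m.drop (n + 1)) hget
      have hdecomp : m = m.take n ++ '@' :: m.drop (n + 1) := by
        conv_lhs => rw [← List.take_append_drop n m]
        rw [hd2]
      refine ⟨m.take n, m.drop (n + 1), tld, hmem, ?_, ?_, ?_, ?_, hnat, hndot⟩
      · conv_lhs => rw [hdecomp]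
        simp
      · have hl : (m.take n).length = n := by
          rw [List.length_take]; omega
        intro hh
        rw [hh] at hl
        simp at hl
        omega
      · have hl : (m.drop (n + 1)).length = m.length - (n + 1) := by
          rw [List.length_drop]
        intro hh
        rw [hh] at hl
        simp at hl
        omega
      · rw [hn]
        exact not_mem_take_idxOf '@' m
    · rw [if_neg hm] at hpos; omega
  · rintro ⟨loc, sub, tld, hmem, rfl, hloc, hsub, hnloc, hnsub, hndsub⟩
    have hshape : loc ++ '@' :: (sub ++ '.' :: tld) = (loc ++ '@' :: sub) ++ '.' :: tld := by
      simp
    refine ⟨(endswith_top _).mpr ⟨tld, loc ++ '@' :: sub, hmem, hshape⟩, ?_⟩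
    have hst : PySem.List.slice (loc ++ '@' :: (sub ++ '.' :: tld)) none (some (-4)) = loc ++ '@' :: sub := by
      rw [hshape]
      exact stem_eq _ tld (top_len tld hmem)
    rw [hst, find_single, if_pos (by simp)]
    have hidx : (loc ++ '@' :: sub).idxOf '@' = loc.length := by
      rw [List.idxOf_append, if_neg hnloc, List.idxOf_cons_self]
      omega
    rw [hidx]
    have hlocpos : 0 < loc.length := List.length_pos_iff.mpr hloc
    have hsubpos : 0 < sub.length := List.length_pos_iff.mpr hsub
    have hlen : (loc ++ '@' :: sub).length = loc.length + 1 + sub.length := by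
      simp; omega
    have hdrop : (loc ++ '@' :: sub).drop (loc.length + 1) = sub := by
      rw [show loc ++ '@' :: sub = (loc ++ ['@']) ++ sub by simp]
      rw [List.drop_left' (by simp)]
    have htn : ((loc.length : Int) + 1).toNat = loc.length + 1 := by omega
    refine ⟨by exact_mod_cast hlocpos, by rw [hlen]; push_cast; omega, ?_, ?_⟩
    · rw [PySem.List.slice_from _ (by omega), htn, hdrop,
          PySem.Chars.isIn_eq_false_iff, singleton_infix_iff]
      exact hnsub
    · rw [PySem.List.slice_from _ (by omega), htn, hdrop,
          PySem.Chars.isIn_eq_false_iff, singleton_infix_iff]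
      exact hndsub

theorem chk_eq (l : List Char) : chkA l = chkB l := by
  rw [Bool.eq_iff_iff, chkA_iff, chkB_iff]

theorem body_eq : bodyA = bodyB := by
  funext a e
  rw [bodyA_eq, bodyB_eq, chk_eq]

-- ===== VERDICT (by name: the statement is the Claim_ definition above) =====
theorem solution_spec : Claim_equal_solution := by
  intro emails _
  show solution emails = solution_alt emails
  unfold solution solution_alt
  rw [body_eq]
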